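-- pv_equiv track=rewrite | github.com/Yiling-Ma/ActReview | Data_Collection/get_icml_raw_data.py | find_rating_field
-- ===== SOURCE A (Python) =====
-- from typing import Any, Dict, List, Optional, Tuple
--
-- RATING_KEYS = [
--     "overall_rating", "rating", "recommendation", "reviewer_rating",
--     "overall_assessment", "overall", "score", "assessment",
-- ]
--
-- def find_rating_field(content: dict) -> Optional[str]:
--     if not isinstance(content, dict):
--         return None
--     keys = list(content.keys())
--     lowmap = {k: k.lower() for k in keys}
--     for pref in RATING_KEYS:
--         for k in keys:
--             if pref in lowmap[k]:
--                 return k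
--     for k in keys:
--         lk = lowmap[k]
--         if any(t in lk for t in ["rating", "score", "recommend", "assess"]):
--             return k
--     return None
-- ===== SOURCE B (Python) =====
-- from typing import Any, Dict, List, Optional, Tuple
--
-- RATING_KEYS = [
--     "overall_rating", "rating", "recommendation", "reviewer_rating",
--     "overall_assessment", "overall", "score", "assessment",
-- ]
--
-- def find_rating_field(content: dict) -> Optional[str]:
--     if not isinstance(content, dict):
--         return None
--     best_rank, best_key = len(RATING_KEYS), None
--     for k in content.keys():
--         rank = next((i for i, pref in enumerate(RATING_KEYS) if pref in k.lower()),
--                     len(RATING_KEYS))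
--         if rank < best_rank:
--             best_rank, best_key = rank, k
--     if best_key is not None:
--         return best_key
--     for k in content.keys():
--         lk = k.lower()
--         if any(t in lk for t in ("rating", "score", "recommend", "assess")):
--             return k
--     return None
-- ===== Notes on version B (the rewrite author's own statement) =====
-- stated objective: alternative
-- what changed: Replaced A's pref-major nested scan plus precomputed lowmap dict with a single key-major argmin pass that tracks each key's preference rank (first-minimal-rank tie-break), keeping the separate fallback substring scan.
import Mathlib
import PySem

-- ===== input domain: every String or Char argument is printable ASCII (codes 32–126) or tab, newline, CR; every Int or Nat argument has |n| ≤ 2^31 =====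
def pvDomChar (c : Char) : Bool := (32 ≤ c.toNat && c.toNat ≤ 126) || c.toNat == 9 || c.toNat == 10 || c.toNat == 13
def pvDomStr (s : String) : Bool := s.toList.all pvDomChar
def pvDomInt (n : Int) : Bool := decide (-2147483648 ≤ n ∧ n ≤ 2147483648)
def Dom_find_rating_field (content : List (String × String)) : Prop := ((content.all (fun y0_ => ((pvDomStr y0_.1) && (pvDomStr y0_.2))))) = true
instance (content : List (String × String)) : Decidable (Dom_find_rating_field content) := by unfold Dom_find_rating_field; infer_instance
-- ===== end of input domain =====

-- B replaces A's pref-major nested scan (with its precomputed lowmap dict) by one key-major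
-- argmin pass over the keys tracking each key's preference rank; same return value ('alternative').

def RATING_KEYS : List String :=
  ["overall_rating", "rating", "recommendation", "reviewer_rating",
   "overall_assessment", "overall", "score", "assessment"]

-- ===== PORT A =====
-- content is a dict, so the isinstance guard is always true and is dropped.
-- lowmap[k] is looked up only for k ∈ keys, where it is always present, so getD "" is exact.
def find_rating_field (content : List (String × String)) : Option String :=
  let keys := PySem.List.dedup (content.map Prod.fst)        -- list(content.keys())
  let lowmap := keys.foldl (fun d k => d.insert k (PySem.Str.lower k)) PySem.Dict.empty
  match RATING_KEYS.findSome?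
      (fun pref => keys.find? (fun k => PySem.Str.isIn pref (lowmap.getD k ""))) with
  | some k => some k
  | none =>
    keys.find? (fun k =>
      ["rating", "score", "recommend", "assess"].any
        (fun t => PySem.Str.isIn t (lowmap.getD k "")))

-- ===== PORT B =====
-- rank of a (lowered) key: next((i for i,pref in enumerate(RATING_KEYS) if pref in lk), len(RATING_KEYS))
def rankOf (lk : String) : Nat :=
  (RATING_KEYS.findIdx? (fun pref => PySem.Str.isIn pref lk)).getD RATING_KEYS.length

def find_rating_field_alt (content : List (String × String)) : Option String :=
  let keys := PySem.List.dedup (content.map Prod.fst)        -- content.keys()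
  let best := keys.foldl
    (fun (b : Nat × Option String) k =>
      let rank := rankOf (PySem.Str.lower k)
      if rank < b.1 then (rank, some k) else b)
    (RATING_KEYS.length, none)
  match best.2 with
  | some k => some k
  | none =>
    keys.find? (fun k =>
      ["rating", "score", "recommend", "assess"].any
        (fun t => PySem.Str.isIn t (PySem.Str.lower k)))

-- ===== PRECONDITION & SPEC =====
def Spec_find_rating_field (content : List (String × String)) (out : Option String) : Prop := out = find_rating_field_alt content
instance (content : List (String × String)) (out : Option String) : Decidable (Spec_find_rating_field content out) := by unfold Spec_find_rating_field; infer_instance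

-- ===== CLAIM (what is proved, stated in full; the proofs are below) =====
def Claim_equal_find_rating_field : Prop := ∀ (content : List (String × String)), Dom_find_rating_field content → Spec_find_rating_field content (find_rating_field content)

-- ===== LEMMAS AND PROOFS =====

theorem lowmap_getD (keys : List String) (d : PySem.Dict String String) (k : String) :
    (keys.foldl (fun d k => d.insert k (PySem.Str.lower k)) d).getD k "" =
      if k ∈ keys then PySem.Str.lower k else d.getD k "" := by
  induction keys generalizing d with
  | nil => simp
  | cons a t ih =>
    simp only [List.foldl_cons, ih, List.mem_cons]
    by_cases hk : k ∈ t
    · simp [hk]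
    · by_cases ha : k = a
      · subst ha; simp [hk, PySem.Dict.getD_insert_self]
      · rw [PySem.Dict.getD_insert]
        simp [hk, ha]

theorem findSome?_congr {α β : Type} (l : List α) (f g : α → Option β)
    (h : ∀ x ∈ l, f x = g x) : l.findSome? f = l.findSome? g := by
  induction l with
  | nil => rfl
  | cons a t ih =>
    simp only [List.findSome?_cons, h a (by simp)]
    cases g a with
    | some b => rfl
    | none => exact ih (fun x hx => h x (by simp [hx]))

theorem find?_congr {α : Type} (l : List α) (p q : α → Bool)
    (h : ∀ x ∈ l, p x = q x) : l.find? p = l.find? q := by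
  induction l with
  | nil => rfl
  | cons a t ih =>
    simp only [List.find?_cons, h a (by simp)]
    cases q a with
    | true => rfl
    | false => exact ih (fun x hx => h x (by simp [hx]))

-- the key-major argmin fold equals the pref-major first-match search, relative to a
-- threshold m (prefs already ruled out) and a current best ob
theorem fold_argmin_eq (ps : List String) (ok : String → String → Bool)
    (keys : List String) (m : Nat) (ob : Option String) (hm : m ≤ ps.length) :
    (keys.foldl
      (fun (b : Nat × Option String) k =>
        let rank := (ps.findIdx? (fun p => ok p k)).getD ps.length
        if rank < b.1 then (rank, some k) else b)
      (m, ob)).2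
    = ((ps.take m).findSome? (fun p => keys.find? (fun k => ok p k))).or ob := by
  induction keys generalizing m ob with
  | nil =>
    rw [List.foldl_nil,
      findSome?_congr _ _ (fun _ => none) (fun x _ => List.find?_nil),
      List.findSome?_eq_none_iff.2 (fun x _ => rfl), Option.none_or]
  | cons k t ih =>
    simp only [List.foldl_cons]
    by_cases hlt : (ps.findIdx? (fun p => ok p k)).getD ps.length < m
    · cases hfi : ps.findIdx? (fun p => ok p k) with
      | none => rw [hfi] at hlt; simp at hlt; omega
      | some r =>
      simp only [Option.getD_some]
      obtain ⟨hrlen, hfidx⟩ := List.findIdx?_eq_some_iff_findIdx_eq.1 hfi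
      subst hfidx
      have hok : ok (ps[List.findIdx (fun p => ok p k) ps]'hrlen) k = true := by
        simpa using List.findIdx_getElem (p := fun p => ok p k) (xs := ps) (w := hrlen)
      have hnot : ∀ j, j < List.findIdx (fun p => ok p k) ps →
          ∀ (hj : j < ps.length), ok ps[j] k = false := by
        intro j hjr hj
        have := List.not_of_lt_findIdx (p := fun p => ok p k) (xs := ps) (i := j) (by omega)
        simpa using this
      rw [hfi, Option.getD_some] at hlt
      rw [if_pos hlt]
      rw [ih _ (some k) (le_of_lt hrlen)]
      -- decompose ps.take m at the first matching index
      have hdecomp : ps.take m = ps.take (List.findIdx (fun p => ok p k) ps) ++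
          ps[List.findIdx (fun p => ok p k) ps] :: (ps.take m).drop (List.findIdx (fun p => ok p k) ps + 1) := by
        conv_lhs => rw [← List.take_append_drop (List.findIdx (fun p => ok p k) ps) (ps.take m)]
        rw [List.take_take, Nat.min_eq_left (le_of_lt hlt)]
        congr 1
        rw [List.drop_eq_getElem_cons (by rw [List.length_take]; exact lt_min hlt hrlen)]
        congr 1
        exact List.getElem_take
      rw [hdecomp, List.findSome?_append]
      have hhead : (ps[List.findIdx (fun p => ok p k) ps] ::
            (ps.take m).drop (List.findIdx (fun p => ok p k) ps + 1)).findSome?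
          (fun p => (k :: t).find? (fun k' => ok p k')) = some k := by
        simp [List.find?_cons_of_pos, hok]
      rw [hhead]
      have hseg : (ps.take (List.findIdx (fun p => ok p k) ps)).findSome?
            (fun p => (k :: t).find? (fun k' => ok p k'))
          = (ps.take (List.findIdx (fun p => ok p k) ps)).findSome?
            (fun p => t.find? (fun k' => ok p k')) := by
        apply findSome?_congr
        intro p hp
        obtain ⟨j, hjlen, hj⟩ := List.getElem_of_mem hp
        have hjr : j < List.findIdx (fun p => ok p k) ps := by
          have h := hjlen
          rw [List.length_take] at h
          exact lt_of_lt_of_le h (Nat.min_le_left _ _)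
        have hjps : j < ps.length := by omega
        have hpj : p = ps[j] := by rw [← hj]; exact List.getElem_take
        rw [hpj, List.find?_cons_of_neg (by simp [hnot j hjr hjps])]
      rw [hseg, Option.or_assoc]
      simp
    · rw [if_neg hlt]
      rw [ih m ob hm]
      congr 1
      apply findSome?_congr
      intro p hp
      obtain ⟨j, hjlen, hj⟩ := List.getElem_of_mem hp
      have hjm : j < m := by simp at hjlen; omega
      have hjps : j < ps.length := by simp at hjlen; omega
      have hpj : p = ps[j] := by rw [← hj]; exact List.getElem_take
      -- if ok ps[j] k were true, the first matching index would be ≤ j < m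
      have hfalse : ok ps[j] k = false := by
        cases h' : ok ps[j] k with
        | false => rfl
        | true =>
          exfalso
          have hex : ∃ x ∈ ps, (fun p => ok p k) x = true := ⟨ps[j], by simp, h'⟩
          have hfl := List.findIdx_lt_length_of_exists hex
          have hsome : ps.findIdx? (fun p => ok p k) = some (List.findIdx (fun p => ok p k) ps) :=
            List.findIdx?_eq_some_iff_findIdx_eq.2 ⟨hfl, rfl⟩
          have hler : List.findIdx (fun p => ok p k) ps ≤ j := by
            by_contra hgt
            have hf : ok ps[j] k = false := by
              have := List.not_of_lt_findIdx (p := fun p => ok p k) (xs := ps) (i := j) (by omega)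
              simpa using this
            rw [hf] at h'
            exact Bool.false_ne_true h' 
          rw [hsome] at hlt
          simp at hlt
          omega
      rw [hpj, List.find?_cons_of_neg (by simp [hfalse])]

-- ===== VERDICT (by name: the statement is the Claim_ definition above) =====
theorem find_rating_field_spec : Claim_equal_find_rating_field := by
  intro content _
  unfold Spec_find_rating_field find_rating_field find_rating_field_alt
  set keys := PySem.List.dedup (content.map Prod.fst) with hkeys
  have hlow : ∀ k ∈ keys,
      (keys.foldl (fun d k => d.insert k (PySem.Str.lower k)) PySem.Dict.empty).getD k ""
        = PySem.Str.lower k := by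
    intro k hk; rw [lowmap_getD]; simp [hk]
  have h1 : RATING_KEYS.findSome? (fun pref => keys.find? (fun k =>
        PySem.Str.isIn pref ((keys.foldl (fun d k => d.insert k (PySem.Str.lower k)) PySem.Dict.empty).getD k "")))
      = RATING_KEYS.findSome? (fun pref => keys.find? (fun k => PySem.Str.isIn pref (PySem.Str.lower k))) := by
    apply findSome?_congr
    intro p _
    apply find?_congr
    intro k hk
    rw [hlow k hk]
  have h3 : keys.find? (fun k => ["rating", "score", "recommend", "assess"].any
        (fun t => PySem.Str.isIn t ((keys.foldl (fun d k => d.insert k (PySem.Str.lower k)) PySem.Dict.empty).getD k "")))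
      = keys.find? (fun k => ["rating", "score", "recommend", "assess"].any
        (fun t => PySem.Str.isIn t (PySem.Str.lower k))) := by
    apply find?_congr
    intro k hk
    rw [hlow k hk]
  have h2 := fold_argmin_eq RATING_KEYS (fun p k => PySem.Str.isIn p (PySem.Str.lower k))
      keys RATING_KEYS.length none le_rfl
  rw [List.take_length, Option.or_none] at h2
  simp only [rankOf]
  rw [h1, h3, h2]
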